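-- pv_equiv track=rewrite | github.com/jloutey-hash/geovac | geovac/level4_multichannel.py | _channel_list
-- ===== SOURCE A (Python) =====
-- from typing import Tuple, List, Union, Callable, Optional
--
-- def _channel_list(
--     l_max: int,
--     homonuclear: bool = True,
-- ) -> List[Tuple[int, int]]:
--     """
--     Build list of (l1, l2) channels for sigma orbitals (m=0).
--
--     Constraints:
--     - m1 = m2 = 0 (sigma orbitals)
--     - l1 + l2 even (gerade symmetry) when homonuclear=True
--     - All l1, l2 combinations when homonuclear=False
--     - Both orderings (l1, l2) and (l2, l1) included when l1 != l2,
--       because they have DIFFERENT centrifugal potentials and the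
--       nuclear field couples (0,0) -> (0,2) and (0,0) -> (2,0)
--       through different electrons.
--
--     Returns list of (l1, l2) tuples sorted by l1+l2 then l1.
--     """
--     channels = []
--     for l1 in range(l_max + 1):
--         for l2 in range(l_max + 1):
--             if homonuclear and (l1 + l2) % 2 != 0:
--                 continue
--             channels.append((l1, l2))
--     channels.sort(key=lambda x: (x[0] + x[1], x[0]))
--     return channels
-- ===== SOURCE B (Python) =====
-- from typing import Tuple, List
--
-- def _channel_list(
--     l_max: int,
--     homonuclear: bool = True,
-- ) -> List[Tuple[int, int]]:
--     """Generate the (l1, l2) sigma channels directly in sorted order: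
--     iterate the sum s = l1 + l2 ascending, then l1 ascending, so no sort
--     is needed."""
--     channels = []
--     for s in range(2 * l_max + 1):
--         if homonuclear and s % 2 != 0:
--             continue
--         for l1 in range(max(0, s - l_max), min(s, l_max) + 1):
--             channels.append((l1, s - l1))
--     return channels
-- ===== Notes on version B (the rewrite author's own statement) =====
-- stated objective: faster
-- what changed: Instead of enumerating all (l1,l2) pairs and then sorting them by (l1+l2, l1), B generates the pairs directly in that order by iterating the sum s ascending and l1 ascending within each sum, so no sort is needed.
import Mathlib
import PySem

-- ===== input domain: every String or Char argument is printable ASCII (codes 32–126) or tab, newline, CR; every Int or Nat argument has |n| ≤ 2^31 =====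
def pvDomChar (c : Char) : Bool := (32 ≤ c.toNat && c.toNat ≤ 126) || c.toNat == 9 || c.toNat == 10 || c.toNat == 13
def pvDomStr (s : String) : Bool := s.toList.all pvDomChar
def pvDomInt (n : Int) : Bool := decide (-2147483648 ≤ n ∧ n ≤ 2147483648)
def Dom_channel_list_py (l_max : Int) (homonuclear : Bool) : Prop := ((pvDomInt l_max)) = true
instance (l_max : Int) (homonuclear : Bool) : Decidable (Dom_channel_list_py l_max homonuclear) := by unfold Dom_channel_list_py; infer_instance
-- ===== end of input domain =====

-- B replaces A's "enumerate all (l1,l2) then sort by (l1+l2, l1)" with direct generation in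
-- sorted order (iterate the sum s ascending, then l1 ascending), removing the sort.

-- ===== PORT A =====
-- literal transliteration of A: nested range loops appending, then sort with tuple key
def channel_list_py (l_max : Int) (homonuclear : Bool) : List (Int × Int) :=
  let channels :=
    (PySem.List.pyRange 0 (l_max + 1)).foldl (fun acc l1 =>
      (PySem.List.pyRange 0 (l_max + 1)).foldl (fun acc l2 =>
        if homonuclear && decide (PySem.Int.mod (l1 + l2) 2 ≠ 0) then acc
        else acc ++ [(l1, l2)]) acc) []
  PySem.List.sorted2 channels (fun x => x.1 + x.2) (fun x => x.1)

-- ===== PORT B =====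
-- literal transliteration of B: for s in range(2*l_max+1), skip odd s if homonuclear,
-- then for l1 in range(max(0, s-l_max), min(s, l_max)+1) append (l1, s-l1)
def channel_list_py_alt (l_max : Int) (homonuclear : Bool) : List (Int × Int) :=
  (PySem.List.pyRange 0 (2 * l_max + 1)).foldl (fun acc s =>
    if homonuclear && decide (PySem.Int.mod s 2 ≠ 0) then acc
    else (PySem.List.pyRange (max 0 (s - l_max)) (min s l_max + 1)).foldl
      (fun acc l1 => acc ++ [(l1, s - l1)]) acc) []

-- ===== PRECONDITION & SPEC =====
def Spec_channel_list_py (l_max : Int) (homonuclear : Bool) (out : List (Int × Int)) : Prop := out = channel_list_py_alt l_max homonuclear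
instance (l_max : Int) (homonuclear : Bool) (out : List (Int × Int)) : Decidable (Spec_channel_list_py l_max homonuclear out) := by unfold Spec_channel_list_py; infer_instance

-- ===== CLAIM (what is proved, stated in full; the proofs are below) =====
def Claim_equal_channel_list_py : Prop := ∀ (l_max : Int) (homonuclear : Bool), Dom_channel_list_py l_max homonuclear → Spec_channel_list_py l_max homonuclear (channel_list_py l_max homonuclear)

-- ===== LEMMAS AND PROOFS =====

-- the lexicographic key A's sort uses
def chanKey (x : Int × Int) : Lex (Int × Int) := toLex (x.1 + x.2, x.1)

-- sorted2 with Int keys IS sorted with the lexicographic key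
theorem sorted2_eq_sorted_lex (xs : List (Int × Int)) :
    PySem.List.sorted2 xs (fun x => x.1 + x.2) (fun x => x.1) =
    PySem.List.sorted xs chanKey := by
  rw [PySem.List.sorted_eq_foldl_insertBy]
  show List.foldl (fun acc x => PySem.List.insertBy _ x acc) [] xs = _
  congr 1
  funext acc x
  congr 1
  funext a b
  simp only [chanKey, Prod.Lex.toLex_lt_toLex]
  by_cases h1 : a.1 + a.2 < b.1 + b.2 <;> by_cases h2 : b.1 + b.2 < a.1 + a.2 <;>
    by_cases h3 : a.1 < b.1 <;> simp [h1, h2, h3] <;> omega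

-- A's unsorted channel list, as a flatMap
def chanAU (l_max : Int) (homonuclear : Bool) : List (Int × Int) :=
  (PySem.List.pyRange 0 (l_max + 1)).flatMap (fun l1 =>
    ((PySem.List.pyRange 0 (l_max + 1)).filter
      (fun l2 => !(homonuclear && decide (PySem.Int.mod (l1 + l2) 2 ≠ 0)))).map (fun l2 => (l1, l2)))

theorem channel_list_py_eq (l_max : Int) (homonuclear : Bool) :
    channel_list_py l_max homonuclear =
    PySem.List.sorted (chanAU l_max homonuclear) chanKey := by
  rw [channel_list_py, ← sorted2_eq_sorted_lex]
  congr 1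
  have hinner : ∀ (l1 : Int) (acc : List (Int × Int)),
      (PySem.List.pyRange 0 (l_max + 1)).foldl (fun acc l2 =>
        if homonuclear && decide (PySem.Int.mod (l1 + l2) 2 ≠ 0) then acc
        else acc ++ [(l1, l2)]) acc =
      acc ++ ((PySem.List.pyRange 0 (l_max + 1)).filter
        (fun l2 => !(homonuclear && decide (PySem.Int.mod (l1 + l2) 2 ≠ 0)))).map (fun l2 => (l1, l2)) := by
    intro l1 acc
    rw [← PySem.List.foldl_append_if]
    congr 1
    funext acc2 l2
    rcases hc : (homonuclear && decide (PySem.Int.mod (l1 + l2) 2 ≠ 0)) with _ | _ <;> rfl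
  calc (PySem.List.pyRange 0 (l_max + 1)).foldl (fun acc l1 =>
          (PySem.List.pyRange 0 (l_max + 1)).foldl (fun acc l2 =>
            if homonuclear && decide (PySem.Int.mod (l1 + l2) 2 ≠ 0) then acc
            else acc ++ [(l1, l2)]) acc) []
      = (PySem.List.pyRange 0 (l_max + 1)).foldl (fun acc l1 =>
          acc ++ ((PySem.List.pyRange 0 (l_max + 1)).filter
            (fun l2 => !(homonuclear && decide (PySem.Int.mod (l1 + l2) 2 ≠ 0)))).map (fun l2 => (l1, l2))) [] := by
        congr 1
        funext acc l1
        exact hinner l1 acc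
    _ = chanAU l_max homonuclear := by
        rw [PySem.List.foldl_append_eq_flatMap, List.nil_append, chanAU]

-- B's list, as a flatMap over the sums
def chanB (l_max : Int) (homonuclear : Bool) : List (Int × Int) :=
  (PySem.List.pyRange 0 (2 * l_max + 1)).flatMap (fun s =>
    if homonuclear && decide (PySem.Int.mod s 2 ≠ 0) then []
    else (PySem.List.pyRange (max 0 (s - l_max)) (min s l_max + 1)).map (fun l1 => (l1, s - l1)))

theorem channel_list_py_alt_eq (l_max : Int) (homonuclear : Bool) :
    channel_list_py_alt l_max homonuclear = chanB l_max homonuclear := by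
  rw [channel_list_py_alt]
  calc (PySem.List.pyRange 0 (2 * l_max + 1)).foldl (fun acc s =>
          if homonuclear && decide (PySem.Int.mod s 2 ≠ 0) then acc
          else (PySem.List.pyRange (max 0 (s - l_max)) (min s l_max + 1)).foldl
            (fun acc l1 => acc ++ [(l1, s - l1)]) acc) []
      = (PySem.List.pyRange 0 (2 * l_max + 1)).foldl (fun acc s =>
          acc ++ (if homonuclear && decide (PySem.Int.mod s 2 ≠ 0) then []
            else (PySem.List.pyRange (max 0 (s - l_max)) (min s l_max + 1)).map (fun l1 => (l1, s - l1)))) [] := by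
        congr 1
        funext acc s
        rw [PySem.List.foldl_append_singleton_eq_map]
        rcases hc : (homonuclear && decide (PySem.Int.mod s 2 ≠ 0)) with _ | _
        · rfl
        · rw [if_pos rfl, if_pos rfl, List.append_nil]
    _ = chanB l_max homonuclear := by
        rw [PySem.List.foldl_append_eq_flatMap, List.nil_append, chanB]

-- the skip condition of both loops, as a proposition about the sum
theorem skip_false_iff (homonuclear : Bool) (s : Int) :
    (homonuclear && decide (PySem.Int.mod s 2 ≠ 0)) = false ↔ (homonuclear = true → 2 ∣ s) := by
  cases homonuclear <;> simp []

theorem mem_chanAU (l_max : Int) (homonuclear : Bool) (l1 l2 : Int) :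
    ((l1, l2) ∈ chanAU l_max homonuclear) ↔
      0 ≤ l1 ∧ l1 ≤ l_max ∧ 0 ≤ l2 ∧ l2 ≤ l_max ∧
      (homonuclear = true → 2 ∣ (l1 + l2)) := by
  simp only [chanAU, List.mem_flatMap, List.mem_map, List.mem_filter,
    PySem.List.mem_pyRange_one, Bool.not_eq_eq_eq_not, Bool.not_true]
  constructor
  · rintro ⟨a, ha, b, ⟨hb, hskip⟩, heq⟩
    injection heq with e1 e2
    subst e1; subst e2
    exact ⟨by omega, by omega, by omega, by omega, (skip_false_iff _ _).mp hskip⟩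
  · rintro ⟨h1, h2, h3, h4, h5⟩
    exact ⟨l1, by omega, l2, ⟨by omega, (skip_false_iff _ _).mpr h5⟩, rfl⟩

theorem mem_chanB (l_max : Int) (homonuclear : Bool) (l1 l2 : Int) :
    ((l1, l2) ∈ chanB l_max homonuclear) ↔
      0 ≤ l1 ∧ l1 ≤ l_max ∧ 0 ≤ l2 ∧ l2 ≤ l_max ∧
      (homonuclear = true → 2 ∣ (l1 + l2)) := by
  simp only [chanB, List.mem_flatMap, PySem.List.mem_pyRange_one]
  constructor
  · rintro ⟨s, hs, hx⟩
    rcases hb : (homonuclear && decide (PySem.Int.mod s 2 ≠ 0)) with _ | _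
    · rw [hb] at hx
      simp only [Bool.false_eq_true, if_false, List.mem_map, PySem.List.mem_pyRange_one] at hx
      obtain ⟨a, ha, heq⟩ := hx
      injection heq with e1 e2
      subst e1; subst e2
      refine ⟨by omega, by omega, by omega, by omega, fun hh => ?_⟩
      have : a + (s - a) = s := by omega
      rw [this]
      exact (skip_false_iff _ _).mp hb hh
    · rw [hb] at hx; simp at hx
  · rintro ⟨h1, h2, h3, h4, h5⟩
    refine ⟨l1 + l2, by omega, ?_⟩
    rw [(skip_false_iff homonuclear (l1 + l2)).mpr h5]
    simp only [Bool.false_eq_true, if_false, List.mem_map, PySem.List.mem_pyRange_one]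
    refine ⟨l1, ⟨by omega, by omega⟩, ?_⟩
    rw [Prod.mk.injEq]
    omega

theorem pairwise_lt_pyRange (a b : Int) :
    (PySem.List.pyRange a b).Pairwise (· < ·) := by
  rw [PySem.List.pyRange_of_pos a b Int.one_pos]
  refine List.Pairwise.map _ ?_ List.pairwise_lt_range
  intro i j h
  omega

theorem nodup_pyRange (a b : Int) : (PySem.List.pyRange a b).Nodup :=
  (pairwise_lt_pyRange a b).imp ne_of_lt

theorem nodup_chanAU (l_max : Int) (homonuclear : Bool) :
    (chanAU l_max homonuclear).Nodup := by
  rw [chanAU, List.nodup_flatMap]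
  constructor
  · intro l1 _
    exact List.Nodup.map (fun a b h => by injection h)
      ((nodup_pyRange _ _).filter _)
  · refine (pairwise_lt_pyRange _ _).imp ?_
    intro a b hab x hx hy
    simp only [List.mem_map] at hx hy
    obtain ⟨u, _, rfl⟩ := hx
    obtain ⟨v, _, h⟩ := hy
    injection h.symm with e1 _
    omega

theorem pairwise_key_chanB (l_max : Int) (homonuclear : Bool) :
    (chanB l_max homonuclear).Pairwise (fun a b => chanKey a < chanKey b) := by
  rw [chanB, List.pairwise_flatMap]
  constructor
  · intro s _
    by_cases h : (homonuclear && decide (PySem.Int.mod s 2 ≠ 0)) = true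
    · rw [if_pos h]
      exact List.Pairwise.nil
    · rw [if_neg h]
      refine List.Pairwise.map _ ?_ (pairwise_lt_pyRange _ _)
      intro a b hab
      simp only [chanKey, Prod.Lex.toLex_lt_toLex]
      right
      exact ⟨by omega, hab⟩
  · refine (pairwise_lt_pyRange _ _).imp ?_
    intro s t hst x hx y hy
    have hsum : ∀ (u : Int) (z : Int × Int),
        z ∈ (if homonuclear && decide (PySem.Int.mod u 2 ≠ 0) then ([] : List (Int × Int))
          else (PySem.List.pyRange (max 0 (u - l_max)) (min u l_max + 1)).map (fun l1 => (l1, u - l1))) →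
        z.1 + z.2 = u := by
      intro u z hz
      by_cases h : (homonuclear && decide (PySem.Int.mod u 2 ≠ 0)) = true
      · rw [if_pos h] at hz; cases hz
      · rw [if_neg h] at hz
        simp only [List.mem_map] at hz
        obtain ⟨a, _, rfl⟩ := hz
        omega
    simp only [chanKey, Prod.Lex.toLex_lt_toLex]
    left
    have h1 := hsum s x hx
    have h2 := hsum t y hy
    omega

theorem nodup_chanB (l_max : Int) (homonuclear : Bool) :
    (chanB l_max homonuclear).Nodup :=
  (pairwise_key_chanB l_max homonuclear).imp (fun h => by
    intro hc; subst hc; exact absurd h (lt_irrefl _))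

theorem chanB_perm_chanAU (l_max : Int) (homonuclear : Bool) :
    (chanB l_max homonuclear).Perm (chanAU l_max homonuclear) := by
  rw [List.perm_ext_iff_of_nodup (nodup_chanB _ _) (nodup_chanAU _ _)]
  intro x
  obtain ⟨l1, l2⟩ := x
  rw [mem_chanB, mem_chanAU]

-- ===== VERDICT (by name: the statement is the Claim_ definition above) =====
theorem channel_list_py_spec : Claim_equal_channel_list_py := by
  intro l_max homonuclear _
  unfold Spec_channel_list_py
  rw [channel_list_py_eq, channel_list_py_alt_eq]
  exact PySem.List.sorted_eq_of_perm_of_pairwise_lt _ _ chanKey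
    (chanB_perm_chanAU l_max homonuclear) (pairwise_key_chanB l_max homonuclear)
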